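-- pv_equiv track=rewrite | github.com/UnB-KnEDLe/DODFMiner | dodfminer/extract/polished/acts/aditamento.py | _predictions_dict
-- ===== SOURCE A (Python) =====
-- def _predictions_dict(sentence, prediction):
--     sentence = sentence[1:-1]
--     prediction = prediction[1:-1]
--
--     tags_predicted = [w.split("-")[-1] for w in prediction]
--     tags_positions = {t: [] for t in set(tags_predicted)}
--
--     for i in range(len(tags_predicted)):
--         tags_positions[tags_predicted[i]].append(sentence[i])
--
--     tags_positions = {t: " ".join(tags_positions[t]) for t in tags_positions.keys()}
--     tags_positions.pop("O")
--
--     return tags_positions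
-- ===== SOURCE B (Python) =====
-- def _predictions_dict(sentence, prediction):
--     words = sentence[1:-1]
--     tags = [p.split("-")[-1] for p in prediction[1:-1]]
--     result = {t: " ".join(w for t2, w in zip(tags, words) if t2 == t)
--               for t in dict.fromkeys(tags)}
--     result.pop("O")
--     return result
-- ===== Notes on version B (the rewrite author's own statement) =====
-- stated objective: idiomatic
-- what changed: Replaces the pre-initialised dict plus index-loop grouping pass by a direct dict comprehension that rescans the zipped (tag, word) pairs once per distinct tag.
import Mathlib
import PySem

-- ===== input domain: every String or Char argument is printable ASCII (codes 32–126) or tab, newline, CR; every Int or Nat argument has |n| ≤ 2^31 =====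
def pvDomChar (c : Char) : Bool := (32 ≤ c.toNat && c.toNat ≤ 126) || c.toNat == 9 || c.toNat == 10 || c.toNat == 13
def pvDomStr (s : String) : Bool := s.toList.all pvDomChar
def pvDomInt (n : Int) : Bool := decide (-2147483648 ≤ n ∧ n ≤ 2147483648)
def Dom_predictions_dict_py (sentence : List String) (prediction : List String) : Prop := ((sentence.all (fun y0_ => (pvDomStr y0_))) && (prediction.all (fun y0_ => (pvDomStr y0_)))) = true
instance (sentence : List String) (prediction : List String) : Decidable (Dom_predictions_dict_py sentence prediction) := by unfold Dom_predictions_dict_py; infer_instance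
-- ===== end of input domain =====

-- B replaces A's pre-initialised-dict grouping pass by a dict comprehension that rescans
-- the zipped (tag, word) pairs once per distinct tag (idiomatic; not faster).

-- ===== PORT A =====
-- w.split("-")[-1]: "-" ≠ "" so split? is some, and split returns a nonempty list, so the
-- getD defaults never fire on any input — the total form is exact.
def pvLastTag (w : String) : String :=
  (PySem.List.pyGet? ((PySem.Str.split? w "-").getD []) (-1)).getD ""

def predictions_dict_py (sentence : List String) (prediction : List String) : List (String × String) :=
  let sent := PySem.List.slice sentence (some 1) (some (-1))
  let pred := PySem.List.slice prediction (some 1) (some (-1))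
  let tagsPredicted := pred.map pvLastTag
  -- {t: [] for t in set(tags_predicted)} (output compared as a dict, so Set.ofList order is fine)
  let tagsPositions : PySem.Dict String (List String) :=
    (PySem.Set.ofList tagsPredicted).foldl (fun d t => d.insert t ([] : List String)) PySem.Dict.empty
  -- for i in range(len(tags_predicted)): tags_positions[tags_predicted[i]].append(sentence[i])
  -- every tags_predicted[i] is already a key, and Pre_ keeps i inside sent, so modify/pyGetD are exact
  let tagsPositions :=
    (PySem.List.pyRange 0 (PySem.List.len tagsPredicted) 1).foldl
      (fun d i => d.modify (PySem.List.pyGetD tagsPredicted i "") []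
                    (fun l => l ++ [PySem.List.pyGetD sent i ""])) tagsPositions
  -- {t: " ".join(tags_positions[t]) for t in tags_positions.keys()}
  let joined : PySem.Dict String String :=
    tagsPositions.keys.foldl
      (fun d t => d.insert t (PySem.Str.join " " (tagsPositions.getD t []))) PySem.Dict.empty
  -- .pop("O"): KeyError when "O" is absent — excluded by Pre_; erase is exact when present
  (joined.erase "O").items

-- ===== PORT B =====
def predictions_dict_py_alt (sentence : List String) (prediction : List String) : List (String × String) :=
  let words := PySem.List.slice sentence (some 1) (some (-1))
  let tags := (PySem.List.slice prediction (some 1) (some (-1))).map pvLastTag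
  -- {t: " ".join(w for t2, w in zip(tags, words) if t2 == t) for t in dict.fromkeys(tags)}
  let result : PySem.Dict String String :=
    PySem.Dict.mk ((PySem.List.dedup tags).map (fun t =>
      (t, PySem.Str.join " " (((tags.zip words).filter (fun p => p.1 == t)).map (fun p => p.2)))))
  (result.erase "O").items

-- ===== PRECONDITION & SPEC =====
-- Pre_ excludes exactly the inputs where A raises: KeyError from pop("O") when no tag of
-- prediction[1:-1] is "O", and IndexError from sentence[i] when prediction[1:-1] is longer
-- than sentence[1:-1].
def Pre_predictions_dict_py (sentence : List String) (prediction : List String) : Prop :=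
  "O" ∈ (PySem.List.slice prediction (some 1) (some (-1))).map pvLastTag ∧
  (PySem.List.slice prediction (some 1) (some (-1))).length ≤
    (PySem.List.slice sentence (some 1) (some (-1))).length
instance (sentence : List String) (prediction : List String) : Decidable (Pre_predictions_dict_py sentence prediction) := by unfold Pre_predictions_dict_py; infer_instance

def pvWitness_predictions_dict_py : List String × List String :=
  (["<s>", "w1", "w2", "</s>"], ["X", "B-A", "O", "Y"])

def Spec_predictions_dict_py (sentence : List String) (prediction : List String) (out : List (String × String)) : Prop := out = predictions_dict_py_alt sentence prediction
instance (sentence : List String) (prediction : List String) (out : List (String × String)) : Decidable (Spec_predictions_dict_py sentence prediction out) := by unfold Spec_predictions_dict_py; infer_instance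

-- ===== CLAIM (what is proved, stated in full; the proofs are below) =====
def Claim_equal_predictions_dict_py : Prop := ∀ (sentence : List String) (prediction : List String), Dom_predictions_dict_py sentence prediction → Pre_predictions_dict_py sentence prediction → Spec_predictions_dict_py sentence prediction (predictions_dict_py sentence prediction)


-- ===== LEMMAS AND PROOFS =====

lemma pv_loop_eq_zip (tags words : List String) (d : PySem.Dict String (List String))
    (h : tags.length ≤ words.length) :
    (PySem.List.pyRange 0 (PySem.List.len tags) 1).foldl
      (fun d i => d.modify (PySem.List.pyGetD tags i "") []
                    (fun l => l ++ [PySem.List.pyGetD words i ""])) d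
    = (tags.zip words).foldl (fun d p => d.modify p.1 [] (fun l => l ++ [p.2])) d := by
  rw [PySem.List.len_eq, PySem.List.pyRange_zero_nat, List.foldl_map]
  simp only [PySem.List.pyGetD_natCast]
  induction tags generalizing words d with
  | nil => simp
  | cons t ts ih =>
    cases words with
    | nil => simp at h
    | cons w ws =>
      simp only [List.length_cons]
      rw [List.range_succ_eq_map]
      simp only [List.foldl_cons, List.foldl_map, List.getD_cons_zero, List.getD_cons_succ,
        List.zip_cons_cons]
      exact ih ws _ (by simpa using h)

lemma pv_update_of_subset {s : PySem.Set String} {xs : List String}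
    (h : ∀ x ∈ xs, x ∈ s) : PySem.Set.update s xs = s := by
  rw [PySem.Set.update_eq_append_filter]
  have hnil : List.filter (fun y => !s.contains y) (PySem.Set.ofList xs) = [] := by
    apply List.filter_eq_nil_iff.mpr
    intro a ha
    simpa using h a ((PySem.Set.mem_ofList xs a).mp ha)
  rw [hnil, List.append_nil]

def pvGroup (tags words : List String) (t : String) : List String :=
  ((tags.zip words).filter (fun p => p.1 == t)).map (fun p => p.2)

lemma pv_d0 (tags : List String) :
    (PySem.Set.ofList tags).foldl (fun d t => d.insert t ([] : List String)) PySem.Dict.empty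
    = PySem.Dict.mk ((PySem.Set.ofList tags).map (fun t => (t, ([] : List String)))) := by
  apply PySem.Dict.ext
  have := PySem.Dict.items_foldl_insert_fresh (PySem.Set.ofList tags) (fun t => t)
    (fun _ => ([] : List String)) PySem.Dict.empty
    (by intro a _; simp) (by simp [PySem.Set.nodup_ofList])
  simpa using this

lemma pv_getD_mk_nil (K : PySem.Set String) (hKnd : K.Nodup) (t : String) :
    (PySem.Dict.mk (K.map (fun t => (t, ([] : List String))))).getD t [] = [] := by
  have hnd : (PySem.Dict.mk (K.map (fun t => (t, ([] : List String))))).keys.Nodup := by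
    simpa [Function.comp_def] using hKnd
  by_cases ht : t ∈ K
  · have hmem : (t, ([] : List String)) ∈
        (PySem.Dict.mk (K.map (fun t => (t, ([] : List String))))).items :=
      List.mem_map.mpr ⟨t, ht, rfl⟩
    exact PySem.Dict.getD_of_mem_items _ hmem hnd []
  · refine PySem.Dict.getD_of_not_contains _ _ ?_
    rw [PySem.Dict.contains_eq_decide_mem_keys]
    simp [PySem.Dict.keys_mk, ht]

lemma pv_d1 (tags words : List String) (h : tags.length ≤ words.length) :
    (PySem.List.pyRange 0 (PySem.List.len tags) 1).foldl
      (fun d i => d.modify (PySem.List.pyGetD tags i "") []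
                    (fun l => l ++ [PySem.List.pyGetD words i ""]))
      ((PySem.Set.ofList tags).foldl (fun d t => d.insert t ([] : List String)) PySem.Dict.empty)
    = PySem.Dict.mk ((PySem.Set.ofList tags).map (fun t => (t, pvGroup tags words t))) := by
  rw [pv_loop_eq_zip tags words _ h, pv_d0]
  have hKnd := PySem.Set.nodup_ofList tags
  have hkeys : ((tags.zip words).foldl (fun d p => d.modify p.1 [] (fun l => l ++ [p.2]))
      (PySem.Dict.mk ((PySem.Set.ofList tags).map (fun t => (t, ([] : List String)))))).keys
      = PySem.Set.ofList tags := by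
    rw [PySem.Dict.keys_foldl_modify_key (tags.zip words) (fun p => p.1) []
      (fun _ p l => l ++ [p.2])]
    have hbase : (PySem.Dict.mk ((PySem.Set.ofList tags).map
        (fun t => (t, ([] : List String))))).keys = PySem.Set.ofList tags := by
      simp [PySem.Dict.keys_mk, Function.comp_def]
    rw [hbase]
    apply pv_update_of_subset
    intro x hx
    obtain ⟨p, hp, rfl⟩ := List.mem_map.mp hx
    exact (PySem.Set.mem_ofList tags p.1).mpr (List.of_mem_zip hp).1
  apply PySem.Dict.ext
  rw [PySem.Dict.items_eq_map_keys _ (by rw [hkeys]; exact hKnd) ([] : List String), hkeys]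
  apply List.map_congr_left
  intro t ht
  rw [PySem.Dict.getD_foldl_modify_append, pv_getD_mk_nil _ hKnd]
  rfl

lemma pv_core (tags words : List String) (h : tags.length ≤ words.length) :
    (((PySem.List.pyRange 0 (PySem.List.len tags) 1).foldl
        (fun d i => d.modify (PySem.List.pyGetD tags i "") []
                      (fun l => l ++ [PySem.List.pyGetD words i ""]))
        ((PySem.Set.ofList tags).foldl (fun d t => d.insert t ([] : List String))
          PySem.Dict.empty)).keys.foldl
      (fun d t => d.insert t (PySem.Str.join " "
        (((PySem.List.pyRange 0 (PySem.List.len tags) 1).foldl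
            (fun d i => d.modify (PySem.List.pyGetD tags i "") []
                          (fun l => l ++ [PySem.List.pyGetD words i ""]))
            ((PySem.Set.ofList tags).foldl (fun d t => d.insert t ([] : List String))
              PySem.Dict.empty)).getD t [])))
      PySem.Dict.empty)
    = PySem.Dict.mk ((PySem.List.dedup tags).map (fun t =>
        (t, PySem.Str.join " "
          (((tags.zip words).filter (fun p => p.1 == t)).map (fun p => p.2))))) := by
  rw [pv_d1 tags words h]
  simp only [PySem.List.dedup_eq_ofList]
  have hKnd := PySem.Set.nodup_ofList tags
  have hk : (PySem.Dict.mk ((PySem.Set.ofList tags).map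
      (fun t => (t, pvGroup tags words t)))).keys = PySem.Set.ofList tags := by
    simp [Function.comp_def]
  have hnd2 : (PySem.Dict.mk ((PySem.Set.ofList tags).map
      (fun t => (t, pvGroup tags words t)))).keys.Nodup := by rw [hk]; exact hKnd
  rw [hk]
  apply PySem.Dict.ext
  have hfresh := PySem.Dict.items_foldl_insert_fresh (PySem.Set.ofList tags) (fun t => t)
    (fun t => PySem.Str.join " " ((PySem.Dict.mk ((PySem.Set.ofList tags).map
      (fun t => (t, pvGroup tags words t)))).getD t [])) PySem.Dict.empty
    (by intro a _; simp) (by simp [hKnd])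
  simp only at hfresh
  rw [hfresh]
  apply List.map_congr_left
  intro t ht
  have hmem : (t, pvGroup tags words t) ∈ (PySem.Dict.mk ((PySem.Set.ofList tags).map
      (fun t => (t, pvGroup tags words t)))).items := List.mem_map.mpr ⟨t, ht, rfl⟩
  rw [PySem.Dict.getD_of_mem_items _ hmem hnd2 []]
  rfl

-- ===== VERDICT (by name: the statement is the Claim_ definition above) =====
theorem predictions_dict_py_spec : Claim_equal_predictions_dict_py := by
  intro sentence prediction _ hpre
  obtain ⟨_, hlen⟩ := hpre
  simp only [Spec_predictions_dict_py, predictions_dict_py, predictions_dict_py_alt]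
  rw [pv_core ((PySem.List.slice prediction (some 1) (some (-1))).map pvLastTag)
      (PySem.List.slice sentence (some 1) (some (-1))) (by simpa using hlen)]
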